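-- pv_equiv track=rewrite | github.com/philcharron-cfia/biogrinder | src/SimulatedRead.py | generate_quality_scores
-- ===== SOURCE A (Python) =====
-- def generate_quality_scores(seq, qual_levels, error_specs = None):
--     """
--     Generate quality scores for a sequence based on the provided quality levels.
--     """
--
--     if not qual_levels or len(qual_levels) != 2:
--         raise ValueError("qual_levels should be a list of two quality scores: [good, bad]")
--
--     good_qual, bad_qual = qual_levels
--     qual = [good_qual] * len(seq)
--     if error_specs is None:
--         return qual
--     for position, mutations in sorted(error_specs.items(), key=lambda x: x[0]):
--         if 0 <= position < len(qual):  # Ensure position is within a valid range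
--             qual[position] = bad_qual
--     return qual
-- ===== SOURCE B (Python) =====
-- def generate_quality_scores(seq, qual_levels, error_specs=None):
--     """
--     Generate quality scores for a sequence based on the provided quality levels.
--     """
--     if not qual_levels or len(qual_levels) != 2:
--         raise ValueError("qual_levels should be a list of two quality scores: [good, bad]")
--     good_qual, bad_qual = qual_levels
--     n = len(seq)
--     if error_specs is None:
--         return [good_qual] * n
--     # segment construction: emit a run of good scores up to each bad position,
--     # then the bad score, walking the distinct valid positions in increasing order
--     out = []
--     prev = 0
--     for p in sorted({p for p in error_specs if 0 <= p < n}):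
--         out += [good_qual] * (p - prev)
--         out.append(bad_qual)
--         prev = p + 1
--     out += [good_qual] * (n - prev)
--     return out
-- ===== Notes on version B (the rewrite author's own statement) =====
-- stated objective: alternative
-- what changed: B never allocates an all-good list to overwrite: it builds the output by run-length segments, emitting a run of good scores before each distinct valid error position (taken in increasing order) followed by one bad score, plus a final good run.
import Mathlib
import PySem

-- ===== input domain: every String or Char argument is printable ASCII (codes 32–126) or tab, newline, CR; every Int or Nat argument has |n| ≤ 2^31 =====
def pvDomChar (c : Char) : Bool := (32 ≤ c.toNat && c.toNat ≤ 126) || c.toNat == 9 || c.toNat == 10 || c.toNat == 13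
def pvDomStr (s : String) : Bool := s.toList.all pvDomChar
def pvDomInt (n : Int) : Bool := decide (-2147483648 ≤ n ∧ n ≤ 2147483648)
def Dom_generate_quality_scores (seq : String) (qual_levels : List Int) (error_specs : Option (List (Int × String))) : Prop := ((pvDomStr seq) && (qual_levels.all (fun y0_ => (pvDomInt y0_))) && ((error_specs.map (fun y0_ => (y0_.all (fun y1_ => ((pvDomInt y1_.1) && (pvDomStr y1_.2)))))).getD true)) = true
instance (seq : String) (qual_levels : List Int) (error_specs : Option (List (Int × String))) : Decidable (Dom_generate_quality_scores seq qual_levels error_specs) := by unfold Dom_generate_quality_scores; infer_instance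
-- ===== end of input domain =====

-- B builds the output by run-length segments (good-run, bad score, … over the sorted distinct
-- valid error positions) instead of A's all-good fill followed by in-place overwrites.
-- Equivalence of the RETURN value is proved on Pre_ (qual_levels of length exactly 2).

-- ===== PORT A =====
def generate_quality_scores (seq : String) (qual_levels : List Int) (error_specs : Option (List (Int × String))) : List Int :=
  match qual_levels with
  | [good_qual, bad_qual] =>
    let qual := List.replicate seq.toList.length good_qual
    match error_specs with
    | none => qual
    | some es =>
      (PySem.List.sorted es (fun x => x.1) false).foldl
        (fun q pm =>
          if 0 ≤ pm.1 && pm.1 < (q.length : Int) then PySem.List.pySetD q pm.1 bad_qual else q)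
        qual
  | _ => []  -- Python raises ValueError here; excluded by Pre_

-- ===== PORT B =====
-- loop body of Source B's segment loop: append the good-run up to p and the bad score, advance prev
def pvSegStep (good_qual bad_qual : Int) (st : List Int × Int) (p : Int) : List Int × Int :=
  (st.1 ++ List.replicate (p - st.2).toNat good_qual ++ [bad_qual], p + 1)

def generate_quality_scores_alt (seq : String) (qual_levels : List Int) (error_specs : Option (List (Int × String))) : List Int :=
  if qual_levels.length ≠ 2 then []  -- Python raises ValueError here; excluded by Pre_
  else
    let good_qual := qual_levels.getD 0 0
    let bad_qual := qual_levels.getD 1 0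
    let n : Int := seq.toList.length
    match error_specs with
    | none => List.replicate seq.toList.length good_qual
    | some es =>
      let ps := PySem.List.sorted
        (PySem.Set.ofList ((es.map Prod.fst).filter (fun p => 0 ≤ p && p < n)))
        (fun x => x) false
      let r := ps.foldl (pvSegStep good_qual bad_qual) ([], 0)
      r.1 ++ List.replicate (n - r.2).toNat good_qual

-- ===== PRECONDITION & SPEC =====
-- Pre_ excludes exactly the inputs where A raises ValueError (qual_levels not of length 2).
def Pre_generate_quality_scores (seq : String) (qual_levels : List Int) (error_specs : Option (List (Int × String))) : Prop :=
  qual_levels.length = 2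
instance (seq : String) (qual_levels : List Int) (error_specs : Option (List (Int × String))) : Decidable (Pre_generate_quality_scores seq qual_levels error_specs) := by unfold Pre_generate_quality_scores; infer_instance

def pvWitness_generate_quality_scores : String × List Int × (Option (List (Int × String))) :=
  ("ACGT", [30, 3], some [(2, "s"), (0, "x"), (7, "y")])

def Spec_generate_quality_scores (seq : String) (qual_levels : List Int) (error_specs : Option (List (Int × String))) (out : List Int) : Prop := out = generate_quality_scores_alt seq qual_levels error_specs
instance (seq : String) (qual_levels : List Int) (error_specs : Option (List (Int × String))) (out : List Int) : Decidable (Spec_generate_quality_scores seq qual_levels error_specs out) := by unfold Spec_generate_quality_scores; infer_instance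

-- ===== CLAIM (what is proved, stated in full; the proofs are below) =====
def Claim_equal_generate_quality_scores : Prop := ∀ (seq : String) (qual_levels : List Int) (error_specs : Option (List (Int × String))), Dom_generate_quality_scores seq qual_levels error_specs → Pre_generate_quality_scores seq qual_levels error_specs → Spec_generate_quality_scores seq qual_levels error_specs (generate_quality_scores seq qual_levels error_specs)

-- ===== LEMMAS AND PROOFS =====

-- recursive description of B's segment loop (proof-only helper)
def pvSeg (good bad n prev : Int) : List Int → List Int
  | [] => List.replicate (n - prev).toNat good
  | p :: ps => List.replicate (p - prev).toNat good ++ bad :: pvSeg good bad n (p + 1) ps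

-- B's foldl-plus-final-run equals the recursive segment builder
theorem pvFoldSeg (good bad n : Int) (ps : List Int) :
    ∀ (acc : List Int) (prev : Int),
      (ps.foldl (pvSegStep good bad) (acc, prev)).1
        ++ List.replicate (n - (ps.foldl (pvSegStep good bad) (acc, prev)).2).toNat good
      = acc ++ pvSeg good bad n prev ps := by
  induction ps with
  | nil => intro acc prev; rfl
  | cons p ps ih =>
    intro acc prev
    simp only [List.foldl_cons, pvSegStep, pvSeg, ih, List.append_assoc,
      List.singleton_append]

-- index characterization of the segment builder
theorem pvSeg_get? (good bad n : Int) (ps : List Int) :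
    ∀ (prev : Int), ps.Pairwise (· < ·) → (∀ p ∈ ps, prev ≤ p ∧ p < n) → prev ≤ n →
    ∀ (i : Nat),
      (pvSeg good bad n prev ps)[i]? =
        if prev + (i : Int) < n then
          some (if (prev + (i : Int)) ∈ ps then bad else good)
        else none := by
  induction ps with
  | nil =>
    intro prev _ _ hprev i
    simp only [pvSeg, List.getElem?_replicate, List.not_mem_nil, if_false]
    split <;> split <;> first | rfl | omega
  | cons p ps ih =>
    intro prev hpw hmem hprev i
    have hp : prev ≤ p ∧ p < n := hmem p (List.mem_cons_self)
    have hrest : ∀ q ∈ ps, p < q := List.pairwise_cons.mp hpw |>.1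
    simp only [pvSeg]
    by_cases hi : i < (p - prev).toNat
    · rw [List.getElem?_append_left (by simpa using hi), List.getElem?_replicate, if_pos hi]
      rw [if_pos (by omega)]
      rw [if_neg (by
        intro hin
        rcases List.mem_cons.mp hin with h | h
        · omega
        · have := hrest _ h; omega)]
    · rw [List.getElem?_append_right (by simpa using Nat.le_of_not_lt hi),
        List.length_replicate]
      rcases Nat.exists_eq_add_of_le (Nat.le_of_not_lt hi) with ⟨j, hj⟩
      subst hj
      have hofs : (p - prev).toNat + j - (p - prev).toNat = j := by omega
      rw [hofs]
      cases j with
      | zero =>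
        simp only [List.getElem?_cons_zero]
        have hpe : prev + (((p - prev).toNat + 0 : Nat) : Int) = p := by push_cast; omega
        rw [if_pos (by push_cast; omega), if_pos (by rw [hpe]; exact List.mem_cons_self)]
      | succ j =>
        simp only [List.getElem?_cons_succ]
        rw [ih (p + 1) (List.pairwise_cons.mp hpw).2
          (fun q hq => ⟨by have := hrest q hq; omega, (hmem q (List.mem_cons_of_mem _ hq)).2⟩)
          (by omega) j]
        have harith : p + 1 + (j : Int) = prev + (((p - prev).toNat + (j + 1) : Nat) : Int) := by
          push_cast; omega
        rw [← harith]
        by_cases hlt : p + 1 + (j : Int) < n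
        · rw [if_pos hlt, if_pos hlt]
          congr 1
          by_cases hin : p + 1 + (j : Int) ∈ ps
          · rw [if_pos hin, if_pos (List.mem_cons_of_mem _ hin)]
          · rw [if_neg hin, if_neg (by
              intro h
              rcases List.mem_cons.mp h with h | h
              · omega
              · exact hin h)]
        · rw [if_neg hlt, if_neg hlt]

-- length invariance of A's update loop
theorem pvFold_length (bad_qual : Int) (es : List (Int × String)) (q : List Int) :
    (es.foldl (fun q pm =>
        if 0 ≤ pm.1 && pm.1 < (q.length : Int) then PySem.List.pySetD q pm.1 bad_qual else q) q).length
      = q.length := by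
  induction es generalizing q with
  | nil => rfl
  | cons pm es ih =>
    simp only [List.foldl_cons]
    split
    · rw [ih, PySem.List.length_pySetD]
    · exact ih q

-- optional-index characterization of A's update loop
theorem pvFold_get? (bad_qual : Int) (es : List (Int × String)) (q : List Int)
    (i : Nat) (hi : i < q.length) :
    (es.foldl (fun q pm =>
        if 0 ≤ pm.1 && pm.1 < (q.length : Int) then PySem.List.pySetD q pm.1 bad_qual else q) q)[i]?
      = if (∃ pm ∈ es, pm.1 = (i : Int)) then some bad_qual else q[i]? := by
  induction es generalizing q with
  | nil => simp
  | cons pm es ih =>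
    simp only [List.foldl_cons]
    by_cases hc : (0 ≤ pm.1 && pm.1 < (q.length : Int)) = true
    · rw [if_pos hc]
      simp only [Bool.and_eq_true, decide_eq_true_eq] at hc
      rw [ih _ (by rw [PySem.List.length_pySetD]; exact hi)]
      rw [PySem.List.pySetD_of_nonneg _ _ hc.1]
      by_cases hex : ∃ p ∈ es, p.1 = (i : Int)
      · simp [hex]
      · rw [if_neg hex]
        by_cases heq : pm.1 = (i : Int)
        · rw [if_pos ⟨pm, List.mem_cons_self, heq⟩, List.getElem?_set]
          rw [if_pos (by omega), if_pos (by omega)]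
        · rw [if_neg (by
              rintro ⟨p, hp, h1⟩
              rcases List.mem_cons.mp hp with h | h
              · exact heq (h ▸ h1)
              · exact hex ⟨p, h, h1⟩)]
          rw [List.getElem?_set, if_neg (by omega)]
    · rw [if_neg hc]
      simp only [Bool.and_eq_true, decide_eq_true_eq] at hc
      rw [ih _ hi]
      by_cases hex : ∃ p ∈ es, p.1 = (i : Int)
      · simp [hex]
      · rw [if_neg hex]
        rw [if_neg (by
            rintro ⟨p, hp, h1⟩
            rcases List.mem_cons.mp hp with h | h
            · subst h; omega
            · exact hex ⟨p, h, h1⟩)]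

-- membership in B's sorted list of valid error positions
theorem pvPs_mem (es : List (Int × String)) (n : Int) (i : Nat) (hi : (i : Int) < n) :
    ((i : Int) ∈ PySem.List.sorted
        (PySem.Set.ofList ((es.map Prod.fst).filter (fun p => 0 ≤ p && p < n)))
        (fun x => x) false)
      ↔ (∃ pm ∈ es, pm.1 = (i : Int)) := by
  rw [PySem.List.mem_sorted, PySem.Set.mem_ofList]
  simp only [List.mem_filter, List.mem_map, Bool.and_eq_true, decide_eq_true_eq]
  constructor
  · rintro ⟨⟨pm, hpm, h⟩, _⟩; exact ⟨pm, hpm, h⟩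
  · rintro ⟨pm, hpm, h⟩; exact ⟨⟨pm, hpm, h⟩, by omega⟩

-- ===== VERDICT (by name: the statement is the Claim_ definition above) =====
theorem generate_quality_scores_spec : Claim_equal_generate_quality_scores := by
  intro seq qual_levels error_specs _ hpre
  unfold Spec_generate_quality_scores
  match qual_levels with
  | [good_qual, bad_qual] =>
    unfold generate_quality_scores generate_quality_scores_alt
    simp only [List.length_cons, List.length_nil]
    rw [if_neg (by omega)]
    match error_specs with
    | none => rfl
    | some es =>
      simp only [List.getD, List.getElem?_cons_zero, List.getElem?_cons_succ, Option.getD_some]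
      set n : Int := (seq.toList.length : Int) with hn
      set ps := PySem.List.sorted
        (PySem.Set.ofList ((es.map Prod.fst).filter (fun p => 0 ≤ p && p < n)))
        (fun x => x) false with hps
      have hpw : ps.Pairwise (· < ·) := PySem.List.sorted_ofList_pairwise_lt _
      have hmem : ∀ p ∈ ps, (0 : Int) ≤ p ∧ p < n := by
        intro p hp
        rw [hps, PySem.List.mem_sorted, PySem.Set.mem_ofList] at hp
        simp only [List.mem_filter, Bool.and_eq_true, decide_eq_true_eq] at hp
        exact hp.2
      rw [pvFoldSeg good_qual bad_qual n ps [] 0, List.nil_append]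
      apply List.ext_getElem?
      intro i
      rw [pvSeg_get? good_qual bad_qual n ps 0 hpw (by simpa using hmem) (by omega) i]
      simp only [zero_add]
      by_cases hi : i < seq.toList.length
      · have hin : ((i : Nat) : Int) < n := by rw [hn]; exact_mod_cast hi
        rw [if_pos hin]
        rw [pvFold_get? bad_qual _ _ i (by simpa using hi)]
        have hsort : (∃ pm ∈ PySem.List.sorted es (fun x => x.1) false, pm.1 = (i : Int))
            ↔ (∃ pm ∈ es, pm.1 = (i : Int)) := by
          constructor
          · rintro ⟨pm, hpm, h⟩
            exact ⟨pm, (PySem.List.mem_sorted es (fun x => x.1) false pm).mp hpm, h⟩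
          · rintro ⟨pm, hpm, h⟩
            exact ⟨pm, (PySem.List.mem_sorted es (fun x => x.1) false pm).mpr hpm, h⟩
        by_cases hex : ∃ pm ∈ es, pm.1 = (i : Int)
        · rw [if_pos (hsort.mpr hex), if_pos ((pvPs_mem es n i hin).mpr hex)]
        · rw [if_neg (fun h => hex (hsort.mp h)),
              if_neg (fun h => hex ((pvPs_mem es n i hin).mp h))]
          rw [List.getElem?_replicate, if_pos hi]
      · rw [List.getElem?_eq_none (by rw [pvFold_length]; simpa using Nat.le_of_not_lt hi),
            if_neg (show ¬((i : Nat) : Int) < n by rw [hn]; omega)]
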